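-- pv_equiv track=rewrite | github.com/pawseidon/Discord-AI-Chatbot | bot_utilities/services/agent_service.py | _detect_secondary_reasoning_types
-- ===== SOURCE A (Python) =====
-- from typing import Dict, Any, Optional, List, Callable, Tuple
--
-- def _detect_secondary_reasoning_types(query: str, primary_type: str) -> List[str]:
--     """
--     Detect secondary reasoning types that should be used alongside the primary type
--
--     Args:
--         query: The user's query
--         primary_type: The primary reasoning type already detected
--
--     Returns:
--         List of secondary reasoning types
--     """
--     secondary_types = []
--     lower_query = query.lower()
--
--     # Look for research patterns that would benefit from RAG
--     if primary_type != "rag" and any(term in lower_query for term in [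
--         "research", "information about", "find", "search", "latest", "recent",
--         "what is", "who is", "learn about", "tell me about", "data on",
--         "statistics", "facts", "history of", "examples of", "articles about"
--     ]):
--         secondary_types.append("rag")
--
--     # Look for verification needs alongside other reasoning
--     if primary_type != "verification" and any(term in lower_query for term in [
--         "verify", "fact check", "is it true", "confirm", "validate", "accurate",
--         "reliable", "trustworthy", "credible", "evidence", "prove", "disprove",
--         "debunk", "authenticate", "cross-check", "check sources"
--     ]):
--         secondary_types.append("verification")
--
--     # Sequential thinking often helps with other reasoning types
--     if primary_type != "sequential" and any(term in lower_query for term in [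
--         "step by step", "analyze", "explain thoroughly", "break down",
--         "detailed explanation", "in depth", "comprehensive", "process",
--         "methodically", "procedure", "sequence", "one by one", "first", "then"
--     ]):
--         secondary_types.append("sequential")
--
--     # Graph thinking for relationship mapping
--     if primary_type != "graph" and any(term in lower_query for term in [
--         "relationship", "connect", "map", "network", "graph", "between",
--         "how does", "relate to", "linked", "association", "diagram", "structure",
--         "conceptual map", "mind map", "flowchart", "connections between"
--     ]):
--         secondary_types.append("graph")
--
--     # Multi-agent for complex problems requiring different perspectives
--     if primary_type not in ["multi_agent", "workflow"] and (
--         "multiple perspectives" in lower_query or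
--         "different viewpoints" in lower_query or
--         "various angles" in lower_query or
--         "different experts" in lower_query or
--         "debate" in lower_query or
--         "pros and cons" in lower_query or
--         "multiple approaches" in lower_query or
--         "team of experts" in lower_query
--     ):
--         secondary_types.append("multi_agent")
--
--     # Chain-of-thought for logical reasoning
--     if primary_type != "cot" and any(term in lower_query for term in [
--         "logical", "deduce", "infer", "reasoning", "think through",
--         "conclusion", "premise", "argument", "logic", "deduction",
--         "derive", "follow the logic", "rationale"
--     ]):
--         secondary_types.append("cot")
--
--     # Creative reasoning for generative tasks
--     if primary_type != "creative" and any(term in lower_query for term in [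
--         "creative", "imagine", "innovative", "generate", "design", "story",
--         "novel idea", "brainstorm", "artistic", "unique", "original",
--         "fantasy", "fiction", "imagine if", "create a", "invent"
--     ]):
--         secondary_types.append("creative")
--
--     return secondary_types
-- ===== SOURCE B (Python) =====
-- # Position-scan rewrite: instead of asking "term in query" per rule, walk the lowered
-- # query once position by position like a naive multi-pattern matcher, collecting the
-- # SET of reasoning types whose keyword starts at some position, then assemble the
-- # output from a fixed order/exclusion table.
--
-- _KEYWORD_TYPES = [
--     ("research", "rag"), ("information about", "rag"), ("find", "rag"),
--     ("search", "rag"), ("latest", "rag"), ("recent", "rag"), ("what is", "rag"),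
--     ("who is", "rag"), ("learn about", "rag"), ("tell me about", "rag"),
--     ("data on", "rag"), ("statistics", "rag"), ("facts", "rag"),
--     ("history of", "rag"), ("examples of", "rag"), ("articles about", "rag"),
--     ("verify", "verification"), ("fact check", "verification"),
--     ("is it true", "verification"), ("confirm", "verification"),
--     ("validate", "verification"), ("accurate", "verification"),
--     ("reliable", "verification"), ("trustworthy", "verification"),
--     ("credible", "verification"), ("evidence", "verification"),
--     ("prove", "verification"), ("disprove", "verification"),
--     ("debunk", "verification"), ("authenticate", "verification"),
--     ("cross-check", "verification"), ("check sources", "verification"),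
--     ("step by step", "sequential"), ("analyze", "sequential"),
--     ("explain thoroughly", "sequential"), ("break down", "sequential"),
--     ("detailed explanation", "sequential"), ("in depth", "sequential"),
--     ("comprehensive", "sequential"), ("process", "sequential"),
--     ("methodically", "sequential"), ("procedure", "sequential"),
--     ("sequence", "sequential"), ("one by one", "sequential"),
--     ("first", "sequential"), ("then", "sequential"),
--     ("relationship", "graph"), ("connect", "graph"), ("map", "graph"),
--     ("network", "graph"), ("graph", "graph"), ("between", "graph"),
--     ("how does", "graph"), ("relate to", "graph"), ("linked", "graph"),
--     ("association", "graph"), ("diagram", "graph"), ("structure", "graph"),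
--     ("conceptual map", "graph"), ("mind map", "graph"), ("flowchart", "graph"),
--     ("connections between", "graph"),
--     ("multiple perspectives", "multi_agent"), ("different viewpoints", "multi_agent"),
--     ("various angles", "multi_agent"), ("different experts", "multi_agent"),
--     ("debate", "multi_agent"), ("pros and cons", "multi_agent"),
--     ("multiple approaches", "multi_agent"), ("team of experts", "multi_agent"),
--     ("logical", "cot"), ("deduce", "cot"), ("infer", "cot"), ("reasoning", "cot"),
--     ("think through", "cot"), ("conclusion", "cot"), ("premise", "cot"),
--     ("argument", "cot"), ("logic", "cot"), ("deduction", "cot"), ("derive", "cot"),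
--     ("follow the logic", "cot"), ("rationale", "cot"),
--     ("creative", "creative"), ("imagine", "creative"), ("innovative", "creative"),
--     ("generate", "creative"), ("design", "creative"), ("story", "creative"),
--     ("novel idea", "creative"), ("brainstorm", "creative"), ("artistic", "creative"),
--     ("unique", "creative"), ("original", "creative"), ("fantasy", "creative"),
--     ("fiction", "creative"), ("imagine if", "creative"), ("create a", "creative"),
--     ("invent", "creative"),
-- ]
--
-- _OUTPUT_ORDER = [
--     ("rag", ("rag",)),
--     ("verification", ("verification",)),
--     ("sequential", ("sequential",)),
--     ("graph", ("graph",)),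
--     ("multi_agent", ("multi_agent", "workflow")),
--     ("cot", ("cot",)),
--     ("creative", ("creative",)),
-- ]
--
-- def _scan_hits(lower_query):
--     """One left-to-right pass: at each position, record the types whose keyword starts here."""
--     hits = set()
--     for j in range(len(lower_query) + 1):
--         for term, rtype in _KEYWORD_TYPES:
--             if lower_query.startswith(term, j):
--                 hits.add(rtype)
--     return hits
--
-- def _detect_secondary_reasoning_types(query: str, primary_type: str):
--     hits = _scan_hits(query.lower())
--     return [rtype for rtype, excluded in _OUTPUT_ORDER
--             if primary_type not in excluded and rtype in hits]
-- ===== Notes on version B (the rewrite author's own statement) =====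
-- stated objective: alternative
-- what changed: Replaced the per-rule 'any(term in query)' substring tests with a single left-to-right position scan of the lowered query (naive multi-pattern matching) that accumulates a set of hit reasoning types, from which the output is assembled via an order/exclusion table.
import Mathlib
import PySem

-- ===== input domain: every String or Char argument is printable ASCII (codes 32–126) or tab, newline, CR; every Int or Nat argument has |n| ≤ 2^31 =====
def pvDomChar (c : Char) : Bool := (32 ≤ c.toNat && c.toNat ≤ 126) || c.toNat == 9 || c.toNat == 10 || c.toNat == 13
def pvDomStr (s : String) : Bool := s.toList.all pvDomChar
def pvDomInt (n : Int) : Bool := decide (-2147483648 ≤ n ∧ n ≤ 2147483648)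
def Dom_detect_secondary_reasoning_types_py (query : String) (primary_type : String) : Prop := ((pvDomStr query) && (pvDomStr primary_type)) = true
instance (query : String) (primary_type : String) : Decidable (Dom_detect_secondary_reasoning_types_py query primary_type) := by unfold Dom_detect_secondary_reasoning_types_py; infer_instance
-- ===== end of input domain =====

-- B replaces A's seven per-rule 'any(term in query)' blocks by a single position scan of the
-- lowered query (naive multi-pattern matching into a set of hit types) plus an order/exclusion table.


-- ===== PORT A =====
-- the `if … : secondary_types.append("rag")` block of A
def pvBlock_rag (lower_query : String) (primary_type : String) (secondary_types : List String) : List String :=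
  if primary_type != "rag" &&
      (["research", "information about", "find", "search", "latest", "recent", "what is", "who is", "learn about", "tell me about", "data on", "statistics", "facts", "history of", "examples of", "articles about"].any (fun term => PySem.Str.isIn term lower_query))
  then secondary_types ++ ["rag"] else secondary_types

-- the `if … : secondary_types.append("verification")` block of A
def pvBlock_verification (lower_query : String) (primary_type : String) (secondary_types : List String) : List String :=
  if primary_type != "verification" &&
      (["verify", "fact check", "is it true", "confirm", "validate", "accurate", "reliable", "trustworthy", "credible", "evidence", "prove", "disprove", "debunk", "authenticate", "cross-check", "check sources"].any (fun term => PySem.Str.isIn term lower_query))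
  then secondary_types ++ ["verification"] else secondary_types

-- the `if … : secondary_types.append("sequential")` block of A
def pvBlock_sequential (lower_query : String) (primary_type : String) (secondary_types : List String) : List String :=
  if primary_type != "sequential" &&
      (["step by step", "analyze", "explain thoroughly", "break down", "detailed explanation", "in depth", "comprehensive", "process", "methodically", "procedure", "sequence", "one by one", "first", "then"].any (fun term => PySem.Str.isIn term lower_query))
  then secondary_types ++ ["sequential"] else secondary_types

-- the `if … : secondary_types.append("graph")` block of A
def pvBlock_graph (lower_query : String) (primary_type : String) (secondary_types : List String) : List String :=
  if primary_type != "graph" &&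
      (["relationship", "connect", "map", "network", "graph", "between", "how does", "relate to", "linked", "association", "diagram", "structure", "conceptual map", "mind map", "flowchart", "connections between"].any (fun term => PySem.Str.isIn term lower_query))
  then secondary_types ++ ["graph"] else secondary_types

-- the `if … : secondary_types.append("multi_agent")` block of A
def pvBlock_multi_agent (lower_query : String) (primary_type : String) (secondary_types : List String) : List String :=
  if !(["multi_agent", "workflow"] : List String).contains primary_type &&
      (PySem.Str.isIn "multiple perspectives" lower_query ||
       PySem.Str.isIn "different viewpoints" lower_query ||
       PySem.Str.isIn "various angles" lower_query ||
       PySem.Str.isIn "different experts" lower_query ||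
       PySem.Str.isIn "debate" lower_query ||
       PySem.Str.isIn "pros and cons" lower_query ||
       PySem.Str.isIn "multiple approaches" lower_query ||
       PySem.Str.isIn "team of experts" lower_query)
  then secondary_types ++ ["multi_agent"] else secondary_types

-- the `if … : secondary_types.append("cot")` block of A
def pvBlock_cot (lower_query : String) (primary_type : String) (secondary_types : List String) : List String :=
  if primary_type != "cot" &&
      (["logical", "deduce", "infer", "reasoning", "think through", "conclusion", "premise", "argument", "logic", "deduction", "derive", "follow the logic", "rationale"].any (fun term => PySem.Str.isIn term lower_query))
  then secondary_types ++ ["cot"] else secondary_types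

-- the `if … : secondary_types.append("creative")` block of A
def pvBlock_creative (lower_query : String) (primary_type : String) (secondary_types : List String) : List String :=
  if primary_type != "creative" &&
      (["creative", "imagine", "innovative", "generate", "design", "story", "novel idea", "brainstorm", "artistic", "unique", "original", "fantasy", "fiction", "imagine if", "create a", "invent"].any (fun term => PySem.Str.isIn term lower_query))
  then secondary_types ++ ["creative"] else secondary_types

def detect_secondary_reasoning_types_py (query : String) (primary_type : String) : List String :=
  let lower_query := PySem.Str.lower query
  let secondary_types : List String := []
  let secondary_types := pvBlock_rag lower_query primary_type secondary_types
  let secondary_types := pvBlock_verification lower_query primary_type secondary_types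
  let secondary_types := pvBlock_sequential lower_query primary_type secondary_types
  let secondary_types := pvBlock_graph lower_query primary_type secondary_types
  let secondary_types := pvBlock_multi_agent lower_query primary_type secondary_types
  let secondary_types := pvBlock_cot lower_query primary_type secondary_types
  let secondary_types := pvBlock_creative lower_query primary_type secondary_types
  secondary_types

-- ===== PORT B =====
-- Source B's module-level tables
def pvKeywordTypes : List (String × String) :=
  [("research", "rag"), ("information about", "rag"), ("find", "rag"),
   ("search", "rag"), ("latest", "rag"), ("recent", "rag"), ("what is", "rag"),
   ("who is", "rag"), ("learn about", "rag"), ("tell me about", "rag"),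
   ("data on", "rag"), ("statistics", "rag"), ("facts", "rag"),
   ("history of", "rag"), ("examples of", "rag"), ("articles about", "rag"),
   ("verify", "verification"), ("fact check", "verification"),
   ("is it true", "verification"), ("confirm", "verification"),
   ("validate", "verification"), ("accurate", "verification"),
   ("reliable", "verification"), ("trustworthy", "verification"),
   ("credible", "verification"), ("evidence", "verification"),
   ("prove", "verification"), ("disprove", "verification"),
   ("debunk", "verification"), ("authenticate", "verification"),
   ("cross-check", "verification"), ("check sources", "verification"),
   ("step by step", "sequential"), ("analyze", "sequential"),
   ("explain thoroughly", "sequential"), ("break down", "sequential"),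
   ("detailed explanation", "sequential"), ("in depth", "sequential"),
   ("comprehensive", "sequential"), ("process", "sequential"),
   ("methodically", "sequential"), ("procedure", "sequential"),
   ("sequence", "sequential"), ("one by one", "sequential"),
   ("first", "sequential"), ("then", "sequential"),
   ("relationship", "graph"), ("connect", "graph"), ("map", "graph"),
   ("network", "graph"), ("graph", "graph"), ("between", "graph"),
   ("how does", "graph"), ("relate to", "graph"), ("linked", "graph"),
   ("association", "graph"), ("diagram", "graph"), ("structure", "graph"),
   ("conceptual map", "graph"), ("mind map", "graph"), ("flowchart", "graph"),
   ("connections between", "graph"),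
   ("multiple perspectives", "multi_agent"), ("different viewpoints", "multi_agent"),
   ("various angles", "multi_agent"), ("different experts", "multi_agent"),
   ("debate", "multi_agent"), ("pros and cons", "multi_agent"),
   ("multiple approaches", "multi_agent"), ("team of experts", "multi_agent"),
   ("logical", "cot"), ("deduce", "cot"), ("infer", "cot"), ("reasoning", "cot"),
   ("think through", "cot"), ("conclusion", "cot"), ("premise", "cot"),
   ("argument", "cot"), ("logic", "cot"), ("deduction", "cot"), ("derive", "cot"),
   ("follow the logic", "cot"), ("rationale", "cot"),
   ("creative", "creative"), ("imagine", "creative"), ("innovative", "creative"),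
   ("generate", "creative"), ("design", "creative"), ("story", "creative"),
   ("novel idea", "creative"), ("brainstorm", "creative"), ("artistic", "creative"),
   ("unique", "creative"), ("original", "creative"), ("fantasy", "creative"),
   ("fiction", "creative"), ("imagine if", "creative"), ("create a", "creative"),
   ("invent", "creative")]

def pvOutputOrder : List (String × List String) :=
  [("rag", ["rag"]),
   ("verification", ["verification"]),
   ("sequential", ["sequential"]),
   ("graph", ["graph"]),
   ("multi_agent", ["multi_agent", "workflow"]),
   ("cot", ["cot"]),
   ("creative", ["creative"])]

-- Source B's _scan_hits: one pass over positions 0..len(lq); `lq.startswith(term, j)` with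
-- 0 ≤ j ≤ len(lq) is exactly "term is a prefix of lq[j:]", i.e. Chars.startswith (lq.drop j) term.
def pvScanHits (lq : List Char) : PySem.Set String :=
  (List.range (lq.length + 1)).foldl
    (fun hits j =>
      pvKeywordTypes.foldl
        (fun hits p =>
          if PySem.Chars.startswith (lq.drop j) p.1.toList then PySem.Set.add hits p.2 else hits)
        hits)
    []

def detect_secondary_reasoning_types_py_alt (query : String) (primary_type : String) : List String :=
  let hits := pvScanHits (PySem.Str.lower query).toList
  (pvOutputOrder.filter
      (fun r => !r.2.contains primary_type && hits.contains r.1)).map (fun r => r.1)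

-- ===== PRECONDITION & SPEC =====
def Spec_detect_secondary_reasoning_types_py (query : String) (primary_type : String) (out : List String) : Prop := out = detect_secondary_reasoning_types_py_alt query primary_type
instance (query : String) (primary_type : String) (out : List String) : Decidable (Spec_detect_secondary_reasoning_types_py query primary_type out) := by unfold Spec_detect_secondary_reasoning_types_py; infer_instance

-- ===== CLAIM (what is proved, stated in full; the proofs are below) =====
def Claim_equal_detect_secondary_reasoning_types_py : Prop := ∀ (query : String) (primary_type : String), Dom_detect_secondary_reasoning_types_py query primary_type → Spec_detect_secondary_reasoning_types_py query primary_type (detect_secondary_reasoning_types_py query primary_type)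

-- ===== LEMMAS AND PROOFS =====
lemma pv_mem_inner (lq : List Char) (j : Nat) (ps : List (String × String))
    (hits : PySem.Set String) (t : String) :
    t ∈ ps.foldl
        (fun hits p =>
          if PySem.Chars.startswith (lq.drop j) p.1.toList then PySem.Set.add hits p.2 else hits)
        hits ↔
      t ∈ hits ∨ ∃ p ∈ ps, PySem.Chars.startswith (lq.drop j) p.1.toList = true ∧ p.2 = t := by
  induction ps generalizing hits with
  | nil => simp
  | cons q qs ih =>
    rw [List.foldl_cons, ih]
    by_cases h : PySem.Chars.startswith (lq.drop j) q.1.toList = true <;>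
      simp [h, PySem.Set.mem_add] <;> tauto

lemma pv_mem_range_fold (lq : List Char) (n : Nat) (hits : PySem.Set String) (t : String) :
    t ∈ (List.range n).foldl
        (fun hits j =>
          pvKeywordTypes.foldl
            (fun hits p =>
              if PySem.Chars.startswith (lq.drop j) p.1.toList then PySem.Set.add hits p.2 else hits)
            hits)
        hits ↔
      t ∈ hits ∨ ∃ j < n, ∃ p ∈ pvKeywordTypes,
        PySem.Chars.startswith (lq.drop j) p.1.toList = true ∧ p.2 = t := by
  induction n generalizing hits with
  | zero => simp
  | succ n ih =>
    rw [List.range_succ, List.foldl_append, List.foldl_cons, List.foldl_nil, pv_mem_inner, ih]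
    constructor
    · rintro ((h | ⟨j, hj, hp⟩) | ⟨p, hp⟩)
      · exact Or.inl h
      · exact Or.inr ⟨j, by omega, hp⟩
      · exact Or.inr ⟨n, by omega, p, hp⟩
    · rintro (h | ⟨j, hj, hp⟩)
      · exact Or.inl (Or.inl h)
      · rcases Nat.lt_succ_iff_lt_or_eq.mp hj with h' | rfl
        · exact Or.inl (Or.inr ⟨j, h', hp⟩)
        · exact Or.inr hp

lemma pv_mem_scanHits (lq : List Char) (t : String) :
    t ∈ pvScanHits lq ↔
      ∃ p ∈ pvKeywordTypes, PySem.Chars.isIn p.1.toList lq = true ∧ p.2 = t := by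
  unfold pvScanHits
  rw [pv_mem_range_fold]
  simp only [List.not_mem_nil, false_or]
  constructor
  · rintro ⟨j, _, p, hp, hsw, ht⟩
    refine ⟨p, hp, ?_, ht⟩
    rw [← PySem.Chars.exists_prefix_drop_iff_isIn]
    exact ⟨j, (PySem.Chars.startswith_iff _ _).mp hsw⟩
  · rintro ⟨p, hp, hin, ht⟩
    obtain ⟨j, hj⟩ := (PySem.Chars.exists_prefix_drop_iff_isIn _ _).mpr hin
    refine ⟨min j lq.length, by omega, p, hp, (PySem.Chars.startswith_iff _ _).mpr ?_, ht⟩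
    by_cases h : j ≤ lq.length
    · rwa [min_eq_left h]
    · rw [min_eq_right (by omega)]
      rw [List.drop_eq_nil_of_le (by omega)] at hj
      rwa [List.drop_length]

-- ===== VERDICT (by name: the statement is the Claim_ definition above) =====
lemma pv_hits_rag (lq : List Char) :
    (pvScanHits lq).contains "rag" = (PySem.Chars.isIn "research".toList lq || (PySem.Chars.isIn "information about".toList lq || (PySem.Chars.isIn "find".toList lq || (PySem.Chars.isIn "search".toList lq || (PySem.Chars.isIn "latest".toList lq || (PySem.Chars.isIn "recent".toList lq || (PySem.Chars.isIn "what is".toList lq || (PySem.Chars.isIn "who is".toList lq || (PySem.Chars.isIn "learn about".toList lq || (PySem.Chars.isIn "tell me about".toList lq || (PySem.Chars.isIn "data on".toList lq || (PySem.Chars.isIn "statistics".toList lq || (PySem.Chars.isIn "facts".toList lq || (PySem.Chars.isIn "history of".toList lq || (PySem.Chars.isIn "examples of".toList lq || PySem.Chars.isIn "articles about".toList lq))))))))))))))) := by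
  rw [Bool.eq_iff_iff]
  simp only [PySem.Set.contains_iff, pv_mem_scanHits]
  simp [pvKeywordTypes]

lemma pv_hits_verification (lq : List Char) :
    (pvScanHits lq).contains "verification" = (PySem.Chars.isIn "verify".toList lq || (PySem.Chars.isIn "fact check".toList lq || (PySem.Chars.isIn "is it true".toList lq || (PySem.Chars.isIn "confirm".toList lq || (PySem.Chars.isIn "validate".toList lq || (PySem.Chars.isIn "accurate".toList lq || (PySem.Chars.isIn "reliable".toList lq || (PySem.Chars.isIn "trustworthy".toList lq || (PySem.Chars.isIn "credible".toList lq || (PySem.Chars.isIn "evidence".toList lq || (PySem.Chars.isIn "prove".toList lq || (PySem.Chars.isIn "disprove".toList lq || (PySem.Chars.isIn "debunk".toList lq || (PySem.Chars.isIn "authenticate".toList lq || (PySem.Chars.isIn "cross-check".toList lq || PySem.Chars.isIn "check sources".toList lq))))))))))))))) := by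
  rw [Bool.eq_iff_iff]
  simp only [PySem.Set.contains_iff, pv_mem_scanHits]
  simp [pvKeywordTypes]

lemma pv_hits_sequential (lq : List Char) :
    (pvScanHits lq).contains "sequential" = (PySem.Chars.isIn "step by step".toList lq || (PySem.Chars.isIn "analyze".toList lq || (PySem.Chars.isIn "explain thoroughly".toList lq || (PySem.Chars.isIn "break down".toList lq || (PySem.Chars.isIn "detailed explanation".toList lq || (PySem.Chars.isIn "in depth".toList lq || (PySem.Chars.isIn "comprehensive".toList lq || (PySem.Chars.isIn "process".toList lq || (PySem.Chars.isIn "methodically".toList lq || (PySem.Chars.isIn "procedure".toList lq || (PySem.Chars.isIn "sequence".toList lq || (PySem.Chars.isIn "one by one".toList lq || (PySem.Chars.isIn "first".toList lq || PySem.Chars.isIn "then".toList lq))))))))))))) := by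
  rw [Bool.eq_iff_iff]
  simp only [PySem.Set.contains_iff, pv_mem_scanHits]
  simp [pvKeywordTypes]

lemma pv_hits_graph (lq : List Char) :
    (pvScanHits lq).contains "graph" = (PySem.Chars.isIn "relationship".toList lq || (PySem.Chars.isIn "connect".toList lq || (PySem.Chars.isIn "map".toList lq || (PySem.Chars.isIn "network".toList lq || (PySem.Chars.isIn "graph".toList lq || (PySem.Chars.isIn "between".toList lq || (PySem.Chars.isIn "how does".toList lq || (PySem.Chars.isIn "relate to".toList lq || (PySem.Chars.isIn "linked".toList lq || (PySem.Chars.isIn "association".toList lq || (PySem.Chars.isIn "diagram".toList lq || (PySem.Chars.isIn "structure".toList lq || (PySem.Chars.isIn "conceptual map".toList lq || (PySem.Chars.isIn "mind map".toList lq || (PySem.Chars.isIn "flowchart".toList lq || PySem.Chars.isIn "connections between".toList lq))))))))))))))) := by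
  rw [Bool.eq_iff_iff]
  simp only [PySem.Set.contains_iff, pv_mem_scanHits]
  simp [pvKeywordTypes]

lemma pv_hits_multi_agent (lq : List Char) :
    (pvScanHits lq).contains "multi_agent" = (PySem.Chars.isIn "multiple perspectives".toList lq || PySem.Chars.isIn "different viewpoints".toList lq || PySem.Chars.isIn "various angles".toList lq || PySem.Chars.isIn "different experts".toList lq || PySem.Chars.isIn "debate".toList lq || PySem.Chars.isIn "pros and cons".toList lq || PySem.Chars.isIn "multiple approaches".toList lq || PySem.Chars.isIn "team of experts".toList lq) := by
  rw [Bool.eq_iff_iff]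
  simp only [PySem.Set.contains_iff, pv_mem_scanHits]
  simp [pvKeywordTypes]
  tauto

lemma pv_hits_cot (lq : List Char) :
    (pvScanHits lq).contains "cot" = (PySem.Chars.isIn "logical".toList lq || (PySem.Chars.isIn "deduce".toList lq || (PySem.Chars.isIn "infer".toList lq || (PySem.Chars.isIn "reasoning".toList lq || (PySem.Chars.isIn "think through".toList lq || (PySem.Chars.isIn "conclusion".toList lq || (PySem.Chars.isIn "premise".toList lq || (PySem.Chars.isIn "argument".toList lq || (PySem.Chars.isIn "logic".toList lq || (PySem.Chars.isIn "deduction".toList lq || (PySem.Chars.isIn "derive".toList lq || (PySem.Chars.isIn "follow the logic".toList lq || PySem.Chars.isIn "rationale".toList lq)))))))))))) := by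
  rw [Bool.eq_iff_iff]
  simp only [PySem.Set.contains_iff, pv_mem_scanHits]
  simp [pvKeywordTypes]

lemma pv_hits_creative (lq : List Char) :
    (pvScanHits lq).contains "creative" = (PySem.Chars.isIn "creative".toList lq || (PySem.Chars.isIn "imagine".toList lq || (PySem.Chars.isIn "innovative".toList lq || (PySem.Chars.isIn "generate".toList lq || (PySem.Chars.isIn "design".toList lq || (PySem.Chars.isIn "story".toList lq || (PySem.Chars.isIn "novel idea".toList lq || (PySem.Chars.isIn "brainstorm".toList lq || (PySem.Chars.isIn "artistic".toList lq || (PySem.Chars.isIn "unique".toList lq || (PySem.Chars.isIn "original".toList lq || (PySem.Chars.isIn "fantasy".toList lq || (PySem.Chars.isIn "fiction".toList lq || (PySem.Chars.isIn "imagine if".toList lq || (PySem.Chars.isIn "create a".toList lq || PySem.Chars.isIn "invent".toList lq))))))))))))))) := by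
  rw [Bool.eq_iff_iff]
  simp only [PySem.Set.contains_iff, pv_mem_scanHits]
  simp [pvKeywordTypes]

-- ===== VERDICT (by name: the statement is the Claim_ definition above) =====
theorem detect_secondary_reasoning_types_py_spec : Claim_equal_detect_secondary_reasoning_types_py := by
  intro query primary_type _
  unfold Spec_detect_secondary_reasoning_types_py
  simp only [detect_secondary_reasoning_types_py, detect_secondary_reasoning_types_py_alt,
    pvBlock_rag, pvBlock_verification, pvBlock_sequential, pvBlock_graph, pvBlock_multi_agent,
    pvBlock_cot, pvBlock_creative, pvOutputOrder,
    pv_hits_rag, pv_hits_verification, pv_hits_sequential, pv_hits_graph, pv_hits_multi_agent,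
    pv_hits_cot, pv_hits_creative,
    List.filter_cons, List.filter_nil, List.any_cons, List.any_nil,
    List.contains_cons, List.contains_nil, bne, Bool.or_false,
    PySem.Str.isIn_eq, PySem.Str.toList_lower]
  cases h0 : ((!(primary_type == "rag")) && (PySem.Chars.isIn "research".toList (PySem.Chars.lower query.toList) || (PySem.Chars.isIn "information about".toList (PySem.Chars.lower query.toList) || (PySem.Chars.isIn "find".toList (PySem.Chars.lower query.toList) || (PySem.Chars.isIn "search".toList (PySem.Chars.lower query.toList) || (PySem.Chars.isIn "latest".toList (PySem.Chars.lower query.toList) || (PySem.Chars.isIn "recent".toList (PySem.Chars.lower query.toList) || (PySem.Chars.isIn "what is".toList (PySem.Chars.lower query.toList) || (PySem.Chars.isIn "who is".toList (PySem.Chars.lower query.toList) || (PySem.Chars.isIn "learn about".toList (PySem.Chars.lower query.toList) || (PySem.Chars.isIn "tell me about".toList (PySem.Chars.lower query.toList) || (PySem.Chars.isIn "data on".toList (PySem.Chars.lower query.toList) || (PySem.Chars.isIn "statistics".toList (PySem.Chars.lower query.toList) || (PySem.Chars.isIn "facts".toList (PySem.Chars.lower query.toList) || (PySem.Chars.isIn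 "history of".toList (PySem.Chars.lower query.toList) || (PySem.Chars.isIn "examples of".toList (PySem.Chars.lower query.toList) || PySem.Chars.isIn "articles about".toList (PySem.Chars.lower query.toList))))))))))))))))) <;>
  cases h1 : ((!(primary_type == "verification")) && (PySem.Chars.isIn "verify".toList (PySem.Chars.lower query.toList) || (PySem.Chars.isIn "fact check".toList (PySem.Chars.lower query.toList) || (PySem.Chars.isIn "is it true".toList (PySem.Chars.lower query.toList) || (PySem.Chars.isIn "confirm".toList (PySem.Chars.lower query.toList) || (PySem.Chars.isIn "validate".toList (PySem.Chars.lower query.toList) || (PySem.Chars.isIn "accurate".toList (PySem.Chars.lower query.toList) || (PySem.Chars.isIn "reliable".toList (PySem.Chars.lower query.toList) || (PySem.Chars.isIn "trustworthy".toList (PySem.Chars.lower query.toList) || (PySem.Chars.isIn "credible".toList (PySem.Chars.lower query.toList) || (PySem.Chars.isIn "evidence".toList (PySem.Chars.lower query.toList) || (PySem.Chars.isIn "prove".toList (PySem.Chars.lower query.toList) || (PySem.Chars.isIn "disprove".toList (PySem.Chars.lower query.toList) || (PySem.Chars.isIn "debunk".toList (PySem.Chars.lower query.toList) || (PySem.Chars.isIn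 "authenticate".toList (PySem.Chars.lower query.toList) || (PySem.Chars.isIn "cross-check".toList (PySem.Chars.lower query.toList) || PySem.Chars.isIn "check sources".toList (PySem.Chars.lower query.toList))))))))))))))))) <;>
  cases h2 : ((!(primary_type == "sequential")) && (PySem.Chars.isIn "step by step".toList (PySem.Chars.lower query.toList) || (PySem.Chars.isIn "analyze".toList (PySem.Chars.lower query.toList) || (PySem.Chars.isIn "explain thoroughly".toList (PySem.Chars.lower query.toList) || (PySem.Chars.isIn "break down".toList (PySem.Chars.lower query.toList) || (PySem.Chars.isIn "detailed explanation".toList (PySem.Chars.lower query.toList) || (PySem.Chars.isIn "in depth".toList (PySem.Chars.lower query.toList) || (PySem.Chars.isIn "comprehensive".toList (PySem.Chars.lower query.toList) || (PySem.Chars.isIn "process".toList (PySem.Chars.lower query.toList) || (PySem.Chars.isIn "methodically".toList (PySem.Chars.lower query.toList) || (PySem.Chars.isIn "procedure".toList (PySem.Chars.lower query.toList) || (PySem.Chars.isIn "sequence".toList (PySem.Chars.lower query.toList) || (PySem.Chars.isIn "one by one".toList (PySem.Chars.lower query.toList) || (PySem.Chars.isIn "first".toList (PySem.Chars.lower query.toList)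 || PySem.Chars.isIn "then".toList (PySem.Chars.lower query.toList))))))))))))))) <;>
  cases h3 : ((!(primary_type == "graph")) && (PySem.Chars.isIn "relationship".toList (PySem.Chars.lower query.toList) || (PySem.Chars.isIn "connect".toList (PySem.Chars.lower query.toList) || (PySem.Chars.isIn "map".toList (PySem.Chars.lower query.toList) || (PySem.Chars.isIn "network".toList (PySem.Chars.lower query.toList) || (PySem.Chars.isIn "graph".toList (PySem.Chars.lower query.toList) || (PySem.Chars.isIn "between".toList (PySem.Chars.lower query.toList) || (PySem.Chars.isIn "how does".toList (PySem.Chars.lower query.toList) || (PySem.Chars.isIn "relate to".toList (PySem.Chars.lower query.toList) || (PySem.Chars.isIn "linked".toList (PySem.Chars.lower query.toList) || (PySem.Chars.isIn "association".toList (PySem.Chars.lower query.toList) || (PySem.Chars.isIn "diagram".toList (PySem.Chars.lower query.toList) || (PySem.Chars.isIn "structure".toList (PySem.Chars.lower query.toList) || (PySem.Chars.isIn "conceptual map".toList (PySem.Chars.lower query.toList) || (PySem.Chars.isIn "mind map".toList (PySem.Chars.lower query.toList) || (PySem.Chars.isIn "flowchart".toList (PySem.Chars.lower query.toList) || PySem.Chars.isIn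 "connections between".toList (PySem.Chars.lower query.toList))))))))))))))))) <;>
  cases h4 : ((!(primary_type == "multi_agent" || primary_type == "workflow")) && (PySem.Chars.isIn "multiple perspectives".toList (PySem.Chars.lower query.toList) || PySem.Chars.isIn "different viewpoints".toList (PySem.Chars.lower query.toList) || PySem.Chars.isIn "various angles".toList (PySem.Chars.lower query.toList) || PySem.Chars.isIn "different experts".toList (PySem.Chars.lower query.toList) || PySem.Chars.isIn "debate".toList (PySem.Chars.lower query.toList) || PySem.Chars.isIn "pros and cons".toList (PySem.Chars.lower query.toList) || PySem.Chars.isIn "multiple approaches".toList (PySem.Chars.lower query.toList) || PySem.Chars.isIn "team of experts".toList (PySem.Chars.lower query.toList))) <;>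
  cases h5 : ((!(primary_type == "cot")) && (PySem.Chars.isIn "logical".toList (PySem.Chars.lower query.toList) || (PySem.Chars.isIn "deduce".toList (PySem.Chars.lower query.toList) || (PySem.Chars.isIn "infer".toList (PySem.Chars.lower query.toList) || (PySem.Chars.isIn "reasoning".toList (PySem.Chars.lower query.toList) || (PySem.Chars.isIn "think through".toList (PySem.Chars.lower query.toList) || (PySem.Chars.isIn "conclusion".toList (PySem.Chars.lower query.toList) || (PySem.Chars.isIn "premise".toList (PySem.Chars.lower query.toList) || (PySem.Chars.isIn "argument".toList (PySem.Chars.lower query.toList) || (PySem.Chars.isIn "logic".toList (PySem.Chars.lower query.toList) || (PySem.Chars.isIn "deduction".toList (PySem.Chars.lower query.toList) || (PySem.Chars.isIn "derive".toList (PySem.Chars.lower query.toList) || (PySem.Chars.isIn "follow the logic".toList (PySem.Chars.lower query.toList) || PySem.Chars.isIn "rationale".toList (PySem.Chars.lower query.toList)))))))))))))) <;>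
  cases h6 : ((!(primary_type == "creative")) && (PySem.Chars.isIn "creative".toList (PySem.Chars.lower query.toList) || (PySem.Chars.isIn "imagine".toList (PySem.Chars.lower query.toList) || (PySem.Chars.isIn "innovative".toList (PySem.Chars.lower query.toList) || (PySem.Chars.isIn "generate".toList (PySem.Chars.lower query.toList) || (PySem.Chars.isIn "design".toList (PySem.Chars.lower query.toList) || (PySem.Chars.isIn "story".toList (PySem.Chars.lower query.toList) || (PySem.Chars.isIn "novel idea".toList (PySem.Chars.lower query.toList) || (PySem.Chars.isIn "brainstorm".toList (PySem.Chars.lower query.toList) || (PySem.Chars.isIn "artistic".toList (PySem.Chars.lower query.toList) || (PySem.Chars.isIn "unique".toList (PySem.Chars.lower query.toList) || (PySem.Chars.isIn "original".toList (PySem.Chars.lower query.toList) || (PySem.Chars.isIn "fantasy".toList (PySem.Chars.lower query.toList) || (PySem.Chars.isIn "fiction".toList (PySem.Chars.lower query.toList) || (PySem.Chars.isIn "imagine if".toList (PySem.Chars.lower query.toList) || (PySem.Chars.isIn "create a".toList (PySem.Chars.lower query.toList) || PySem.Chars.isIn "invent".toList (PySem.Chars.lower query.toList))))))))))))))))) 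<;>
    simp [h0, h1, h2, h3, h4, h5, h6]
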